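-- pv_equiv track=rewrite | github.com/AlexZhelPy/CloudSyncApplication | sync/change_detector.py | _compare_folder_structures
-- ===== SOURCE A (Python) =====
-- def _compare_folder_structures(old_folder: str, new_folder: str, current_local, current_cloud) -> bool:
--     """Сравнивает структуры двух папок для определения возможного переименования.
--
--     Args:
--         old_folder: Путь к старой папке
--         new_folder: Путь к новой папке
--         current_local: Текущее состояние локальных файлов
--         current_cloud: Текущее состояние облачных файлов
--
--     Returns:
--         bool: True если структуры папок идентичны (кроме имени), иначе False
--     """
--     old_files = {
--         f[len(old_folder) + 1:]: d
--         for f, d in current_cloud.items()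
--         if f.startswith(old_folder + '/')
--     }
--     new_files = {
--         f[len(new_folder) + 1:]: (mtime, size)
--         for f, (mtime, size) in current_local.items()
--         if f.startswith(new_folder + '/')
--     }
--
--     # Быстрая проверка по количеству файлов
--     if len(old_files) != len(new_files):
--         return False
--
--     # Проверяем совпадение файлов
--     for rel_path, (local_mtime, local_size) in new_files.items():
--         if rel_path not in old_files:
--             return False
--         if local_size != old_files[rel_path]['size']:
--             return False
--
--     return True
-- ===== SOURCE B (Python) =====
-- def _compare_folder_structures(old_folder: str, new_folder: str, current_local, current_cloud) -> bool:
--     """Rename check by sorting: list each side's (relative path, size) pairs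
--     under its folder prefix, sort both lists by path, and compare them."""
--     op = old_folder + '/'
--     np = new_folder + '/'
--     old_pairs = sorted(((f[len(op):], d['size'])
--                         for f, d in current_cloud.items() if f.startswith(op)),
--                        key=lambda p: p[0])
--     new_pairs = sorted(((f[len(np):], size)
--                         for f, (mtime, size) in current_local.items() if f.startswith(np)),
--                        key=lambda p: p[0])
--     return old_pairs == new_pairs
-- ===== Notes on version B (the rewrite author's own statement) =====
-- stated objective: alternative
-- what changed: Replaces A's dict-building with length precheck and per-key membership-and-size lookups by a sort-and-compare: collect each side's (relative path, size) pairs, sort both lists by path, and return a single list equality (the per-item Python-level dict lookups disappear into C-level sorts and one list ==); B reads every matching cloud entry's 'size' eagerly, so Pre_ requires the 'size' key on all cloud entries under old_folder+'/'.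
-- outside the precondition, e.g. on _compare_folder_structures('a', 'b', {}, {'a/x': {}}): A returns False, B raises KeyError
import Mathlib
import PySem

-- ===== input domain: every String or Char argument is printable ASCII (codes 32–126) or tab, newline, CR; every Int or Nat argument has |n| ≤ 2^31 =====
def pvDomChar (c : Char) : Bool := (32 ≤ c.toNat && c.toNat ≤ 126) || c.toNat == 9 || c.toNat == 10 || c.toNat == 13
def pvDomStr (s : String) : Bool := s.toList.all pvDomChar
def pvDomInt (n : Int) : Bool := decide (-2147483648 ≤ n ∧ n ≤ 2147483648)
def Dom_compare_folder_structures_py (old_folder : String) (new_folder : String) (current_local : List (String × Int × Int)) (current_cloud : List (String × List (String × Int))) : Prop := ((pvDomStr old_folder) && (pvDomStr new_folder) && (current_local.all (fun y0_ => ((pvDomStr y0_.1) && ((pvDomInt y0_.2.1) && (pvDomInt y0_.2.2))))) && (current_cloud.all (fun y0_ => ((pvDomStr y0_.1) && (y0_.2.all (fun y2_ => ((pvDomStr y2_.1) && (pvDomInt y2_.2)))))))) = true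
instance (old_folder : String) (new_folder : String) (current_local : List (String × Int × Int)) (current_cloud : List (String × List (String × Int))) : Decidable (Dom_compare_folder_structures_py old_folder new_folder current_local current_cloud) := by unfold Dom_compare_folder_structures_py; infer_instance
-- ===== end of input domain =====

-- B replaces A's dict-building with length precheck and per-key membership/size lookups by a
-- sort-and-compare: collect each side's (relative path, size) pairs, sort both lists by path,
-- and compare the sorted lists (objective: alternative algorithm).


-- ===== PORT A =====
-- the for-loop over new_files.items() with its two early 'return False' branches, in source order;
-- the lookup old_files[rel_path]['size'] is ported with getD default 0 — the KeyError case ('size'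
-- missing) is excluded by Pre_.
def pvCheckA (old_files : PySem.Dict String (List (String × Int))) : List (String × Int × Int) → Bool
  | [] => true
  | (rel_path, _local_mtime, local_size) :: rest =>
    if old_files.contains rel_path = false then false
    else if local_size ≠ PySem.Dict.getD (PySem.Dict.mk (old_files.getD rel_path [])) "size" 0 then false
    else pvCheckA old_files rest

def compare_folder_structures_py (old_folder : String) (new_folder : String) (current_local : List (String × Int × Int)) (current_cloud : List (String × List (String × Int))) : Bool :=
  let old_files : PySem.Dict String (List (String × Int)) :=
    current_cloud.foldl (fun d fd =>
      if PySem.Str.startswith fd.1 (old_folder ++ "/") then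
        d.insert (PySem.Str.slice fd.1 (some (PySem.Str.len old_folder + 1)) none) fd.2
      else d) PySem.Dict.empty
  let new_files : PySem.Dict String (Int × Int) :=
    current_local.foldl (fun d fms =>
      if PySem.Str.startswith fms.1 (new_folder ++ "/") then
        d.insert (PySem.Str.slice fms.1 (some (PySem.Str.len new_folder + 1)) none) fms.2
      else d) PySem.Dict.empty
  if old_files.size ≠ new_files.size then false
  else pvCheckA old_files new_files.items

-- ===== PORT B =====
-- Source B's two sorted generator expressions over the dicts' items (dict → PySem.Dict.ofList), the
-- old-side value d['size'] ported with getD default 0 (KeyError excluded by Pre_), and the final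
-- list equality of the two sorted pair lists.
def compare_folder_structures_py_alt (old_folder : String) (new_folder : String) (current_local : List (String × Int × Int)) (current_cloud : List (String × List (String × Int))) : Bool :=
  let op := old_folder ++ "/"
  let np := new_folder ++ "/"
  let old_pairs :=
    PySem.List.sorted
      (((PySem.Dict.ofList current_cloud).items.filter (fun fd => PySem.Str.startswith fd.1 op)).map
        (fun fd => (PySem.Str.slice fd.1 (some (PySem.Str.len op)) none,
                    PySem.Dict.getD (PySem.Dict.mk fd.2) "size" 0)))
      (fun p => p.1)
  let new_pairs :=
    PySem.List.sorted
      (((PySem.Dict.ofList current_local).items.filter (fun fm => PySem.Str.startswith fm.1 np)).map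
        (fun fm => (PySem.Str.slice fm.1 (some (PySem.Str.len np)) none, fm.2.2)))
      (fun p => p.1)
  old_pairs == new_pairs

-- ===== PRECONDITION & SPEC =====
-- Pre_ requires every cloud entry under old_folder+'/' to carry a 'size' key: A raises KeyError when such
-- an entry is actually looked up, and on some structure mismatches A returns False before touching it
-- while B, which reads all sizes eagerly, raises KeyError there.
def Pre_compare_folder_structures_py (old_folder : String) (new_folder : String) (current_local : List (String × Int × Int)) (current_cloud : List (String × List (String × Int))) : Prop :=
  current_cloud.all (fun fd =>
    !(PySem.Str.startswith fd.1 (old_folder ++ "/")) || fd.2.any (fun kv => kv.1 == "size")) = true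
instance (old_folder : String) (new_folder : String) (current_local : List (String × Int × Int)) (current_cloud : List (String × List (String × Int))) : Decidable (Pre_compare_folder_structures_py old_folder new_folder current_local current_cloud) := by unfold Pre_compare_folder_structures_py; infer_instance

def pvWitness_compare_folder_structures_py : String × String × (List (String × Int × Int)) × (List (String × List (String × Int))) :=
  ("old", "new", [("new/a.txt", 5, 10)], [("old/a.txt", [("size", 10)])])

def Spec_compare_folder_structures_py (old_folder : String) (new_folder : String) (current_local : List (String × Int × Int)) (current_cloud : List (String × List (String × Int))) (out : Bool) : Prop := out = compare_folder_structures_py_alt old_folder new_folder current_local current_cloud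
instance (old_folder : String) (new_folder : String) (current_local : List (String × Int × Int)) (current_cloud : List (String × List (String × Int))) (out : Bool) : Decidable (Spec_compare_folder_structures_py old_folder new_folder current_local current_cloud out) := by unfold Spec_compare_folder_structures_py; infer_instance

-- ===== CLAIM (what is proved, stated in full; the proofs are below) =====
def Claim_equal_compare_folder_structures_py : Prop := ∀ (old_folder : String) (new_folder : String) (current_local : List (String × Int × Int)) (current_cloud : List (String × List (String × Int))), Dom_compare_folder_structures_py old_folder new_folder current_local current_cloud → Pre_compare_folder_structures_py old_folder new_folder current_local current_cloud → Spec_compare_folder_structures_py old_folder new_folder current_local current_cloud (compare_folder_structures_py old_folder new_folder current_local current_cloud)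

-- ===== LEMMAS AND PROOFS =====

-- stripping a fixed prefix from two strings that both start with it is injective
lemma pvStripInj (pfx a b : String)
    (ha : PySem.Str.startswith a pfx = true) (hb : PySem.Str.startswith b pfx = true)
    (h : PySem.Str.slice a (some (PySem.Str.len pfx)) none
       = PySem.Str.slice b (some (PySem.Str.len pfx)) none) : a = b := by
  simp only [PySem.Str.startswith, PySem.Chars.startswith_iff] at ha hb
  obtain ⟨ta, hta⟩ := ha
  obtain ⟨tb, htb⟩ := hb
  have h' := congrArg String.toList h
  simp only [PySem.Str.slice, PySem.Chars.slice, PySem.Str.len_eq, String.toList_ofList] at h'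
  rw [← hta, ← htb, PySem.List.slice_from_natCast, PySem.List.slice_from_natCast,
    List.drop_left, List.drop_left] at h'
  have hl : a.toList = b.toList := by rw [← hta, ← htb, h']
  calc a = String.ofList a.toList := by simp
    _ = String.ofList b.toList := by rw [hl]
    _ = b := by simp

lemma pvLen_prefix (s : String) : PySem.Str.len (s ++ "/") = PySem.Str.len s + 1 := by
  simp

-- the filter-strip-map image of a dict (proof-side only)
def pvT {ν : Type} (pred : String → Bool) (strip : String → String) (E : PySem.Dict String ν) : PySem.Dict String ν :=
  PySem.Dict.mk ((E.items.filter (fun p => pred p.1)).map (fun p => (strip p.1, p.2)))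

lemma pvT_insert {ν : Type} (pred : String → Bool) (strip : String → String)
    (hinj : ∀ a b, pred a = true → pred b = true → strip a = strip b → a = b)
    (E : PySem.Dict String ν) (k : String) (v : ν) :
    pvT pred strip (E.insert k v)
      = if pred k then (pvT pred strip E).insert (strip k) v else pvT pred strip E := by
  have hrep : ∀ p ∈ E.items,
      ((fun q : String × ν => pred q.1) ∘ (fun q : String × ν => if q.1 == k then (k, v) else q)) p
        = pred p.1 := by
    intro p _
    by_cases h : p.1 = k <;> simp [h]
  by_cases hc : E.contains k = true
  · have hi := PySem.Dict.items_insert_of_contains E v hc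
    obtain ⟨q, hqmem, hqk⟩ : ∃ q ∈ E.items, q.1 = k := by
      simpa [PySem.Dict.contains, List.any_eq_true] using hc
    by_cases hp : pred k = true
    · rw [if_pos hp]
      have hck : (pvT pred strip E).contains (strip k) = true := by
        simp only [pvT, PySem.Dict.contains, List.any_eq_true]
        exact ⟨(strip q.1, q.2), List.mem_map_of_mem (List.mem_filter.mpr ⟨hqmem, by simp [hqk, hp]⟩),
          by simp [hqk]⟩
      apply PySem.Dict.ext
      rw [PySem.Dict.items_insert_of_contains _ v hck]
      show ((E.insert k v).items.filter (fun p => pred p.1)).map (fun p => (strip p.1, p.2)) = _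
      rw [hi, List.filter_map, List.filter_congr hrep]
      show _ = ((E.items.filter (fun p => pred p.1)).map (fun p => (strip p.1, p.2))).map _
      rw [List.map_map, List.map_map]
      apply List.map_congr_left
      intro p hpmem
      have hpp : pred p.1 = true := (List.mem_filter.mp hpmem).2
      by_cases h : p.1 = k
      · simp [h]
      · have hne : strip p.1 ≠ strip k := fun hs => h (hinj _ _ hpp hp hs)
        simp [h, hne]
    · rw [if_neg hp]
      apply PySem.Dict.ext
      show ((E.insert k v).items.filter (fun p => pred p.1)).map (fun p => (strip p.1, p.2)) = _
      rw [hi, List.filter_map, List.filter_congr hrep]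
      show _ = (E.items.filter (fun p => pred p.1)).map (fun p => (strip p.1, p.2))
      rw [List.map_map]
      apply List.map_congr_left
      intro p hpmem
      have hpp : pred p.1 = true := (List.mem_filter.mp hpmem).2
      have h : p.1 ≠ k := fun hk => hp (hk ▸ hpp)
      simp [h]
  · have hc' : E.contains k = false := by simpa using hc
    have hi := PySem.Dict.items_insert_of_not_contains E v hc'
    by_cases hp : pred k = true
    · rw [if_pos hp]
      have hck : (pvT pred strip E).contains (strip k) = false := by
        simp only [pvT, PySem.Dict.contains]
        rw [List.any_eq_false]
        rintro x hx
        simp only [List.mem_map, List.mem_filter] at hx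
        obtain ⟨p, ⟨hpmem, hpp⟩, rfl⟩ := hx
        simp only [beq_iff_eq]
        intro hs
        have : p.1 = k := hinj _ _ hpp hp hs
        have : E.contains k = true := by
          simp only [PySem.Dict.contains, List.any_eq_true]
          exact ⟨p, hpmem, by simp [this]⟩
        simp [this] at hc'
      apply PySem.Dict.ext
      rw [PySem.Dict.items_insert_of_not_contains _ v hck]
      show ((E.insert k v).items.filter (fun p => pred p.1)).map (fun p => (strip p.1, p.2)) = _
      rw [hi]
      simp [List.filter_append, hp, pvT]
    · rw [if_neg hp]
      apply PySem.Dict.ext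
      show ((E.insert k v).items.filter (fun p => pred p.1)).map (fun p => (strip p.1, p.2)) = _
      rw [hi]
      simp only [List.filter_append, List.filter_cons, hp]
      simp [pvT]

-- conditional strip-insert folds commute with plain insert folds through pvT
lemma pvT_foldl {ν : Type} (pred : String → Bool) (strip : String → String)
    (hinj : ∀ a b, pred a = true → pred b = true → strip a = strip b → a = b)
    (cc : List (String × ν)) : ∀ (E : PySem.Dict String ν),
    cc.foldl (fun d fd => if pred fd.1 then d.insert (strip fd.1) fd.2 else d) (pvT pred strip E)
      = pvT pred strip (cc.foldl (fun d fd => d.insert fd.1 fd.2) E) := by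
  induction cc with
  | nil => intro E; rfl
  | cons fd cc ih =>
    intro E
    rw [List.foldl_cons, List.foldl_cons, ← pvT_insert pred strip hinj E fd.1 fd.2]
    exact ih _

-- the stripped keys of the filtered image are distinct
lemma pvKeysNodup {ν : Type} (pred : String → Bool) (strip : String → String)
    (hinj : ∀ a b, pred a = true → pred b = true → strip a = strip b → a = b)
    (cc : List (String × ν)) :
    (((((PySem.Dict.ofList cc).items.filter (fun p => pred p.1)).map
        (fun p => (strip p.1, p.2))).map Prod.fst)).Nodup := by
  have hk : ((PySem.Dict.ofList cc).items.map (fun p => p.1)).Nodup :=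
    PySem.Dict.nodup_keys_ofList cc
  have hsubnd : (((PySem.Dict.ofList cc).items.filter (fun p => pred p.1)).map (fun p => p.1)).Nodup :=
    (List.Sublist.map _ List.filter_sublist).nodup hk
  rw [List.map_map]
  have heq : ((Prod.fst ∘ fun p : String × ν => (strip p.1, p.2)))
      = strip ∘ (fun p : String × ν => p.1) := rfl
  rw [heq, ← List.map_map]
  apply List.Nodup.map_on _ hsubnd
  intro x hx y hy hxy
  obtain ⟨p, hp, rfl⟩ := List.mem_map.mp hx
  obtain ⟨q, hq, rfl⟩ := List.mem_map.mp hy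
  exact hinj _ _ (List.mem_filter.mp hp).2 (List.mem_filter.mp hq).2 hxy

-- pointwise image of a dict's values (proof-side only)
def pvMapVal {ν ξ : Type} (f : ν → ξ) (d : PySem.Dict String ν) : PySem.Dict String ξ :=
  PySem.Dict.mk (d.items.map (fun p => (p.1, f p.2)))

lemma pvGet?_mapVal {ν ξ : Type} (f : ν → ξ) (d : PySem.Dict String ν) (k : String) :
    (pvMapVal f d).get? k = (d.get? k).map f := by
  simp only [pvMapVal, PySem.Dict.get?]
  rw [List.find?_map]
  have hp : ((fun p : String × ξ => p.1 == k) ∘ fun p : String × ν => (p.1, f p.2))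
      = fun p : String × ν => p.1 == k := rfl
  rw [hp]
  rcases hf : List.find? (fun p : String × ν => p.1 == k) d.items <;> simp

-- A's early-return loop is an all-items check against the value-image dict
lemma pvCheckA_eq_all (O : PySem.Dict String (List (String × Int))) :
    ∀ (l : List (String × Int × Int)),
      pvCheckA O l
        = l.all (fun p =>
            (pvMapVal (fun d => PySem.Dict.getD (PySem.Dict.mk d) "size" 0) O).get? p.1 == some p.2.2)
  | [] => rfl
  | (rel, mt, sz) :: rest => by
    simp only [pvCheckA, List.all_cons, pvGet?_mapVal, pvCheckA_eq_all O rest]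
    rcases h : O.get? rel with _ | d
    · have hc : O.contains rel = false := by
        rw [PySem.Dict.contains_eq_isSome_get?, h]; rfl
      simp [hc]
    · have hc : O.contains rel = true := by
        rw [PySem.Dict.contains_eq_isSome_get?, h]; rfl
      have hd : O.getD rel [] = d := by simp [PySem.Dict.getD, h]
      simp only [hc, hd, Option.map_some]
      by_cases hsz : sz = PySem.Dict.getD (PySem.Dict.mk d) "size" 0
      · simp [hsz]
      · simp [hsz, Ne.symm hsz]

-- length check + per-key lookup check  =  equality of the path-sorted pair lists (distinct paths)
lemma pvPairwiseLt (l : List (String × Int))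
    (hle : l.Pairwise (fun a b => a.1 ≤ b.1)) (hnd : (l.map Prod.fst).Nodup) :
    l.Pairwise (fun a b => a.1 < b.1) := by
  have hne : l.Pairwise (fun a b => a.1 ≠ b.1) := List.pairwise_map.mp hnd
  exact (hle.and hne).imp (fun h => lt_of_le_of_ne h.1 h.2)

lemma pvSortEq (LP LQ : List (String × Int))
    (hP : (LP.map Prod.fst).Nodup) (hQ : (LQ.map Prod.fst).Nodup) :
    ((LP.length == LQ.length) && LQ.all (fun kv => (PySem.Dict.mk LP).get? kv.1 == some kv.2))
      = (PySem.List.sorted LP (fun p => p.1) == PySem.List.sorted LQ (fun p => p.1)) := by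
  rw [Bool.eq_iff_iff]
  simp only [Bool.and_eq_true, beq_iff_eq, List.all_eq_true]
  constructor
  · rintro ⟨hlen, hall⟩
    have hsub : LQ ⊆ LP := by
      intro kv hkv
      have hm := PySem.Dict.mem_items_of_get?_eq_some (PySem.Dict.mk LP) (hall kv hkv)
      simpa using hm
    have hperm : LQ.Perm LP :=
      (List.subperm_of_subset (hQ.of_map _) hsub).perm_of_length_le (le_of_eq hlen)
    have hndP : ((PySem.List.sorted LP (fun p : String × Int => p.1)).map Prod.fst).Nodup := by
      have hpm := ((PySem.List.sorted_perm LP (fun p : String × Int => p.1) false).map Prod.fst)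
      exact hpm.nodup_iff.mpr hP
    have hlt : (PySem.List.sorted LP (fun p : String × Int => p.1)).Pairwise (fun a b => a.1 < b.1) :=
      pvPairwiseLt _ (PySem.List.sorted_pairwise LP _) hndP
    exact (PySem.List.sorted_eq_of_perm_of_pairwise_lt LQ
      (PySem.List.sorted LP (fun p => p.1)) (fun p => p.1)
      ((PySem.List.sorted_perm LP _ false).trans hperm.symm) hlt).symm
  · intro h
    have h2 : (PySem.List.sorted LP (fun p : String × Int => p.1)).Perm LQ := by
      rw [h]; exact PySem.List.sorted_perm LQ _ false
    have hperm : LP.Perm LQ :=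
      (PySem.List.sorted_perm LP (fun p : String × Int => p.1) false).symm.trans h2
    refine ⟨hperm.length_eq, ?_⟩
    intro kv hkv
    have hmem : kv ∈ LP := hperm.mem_iff.mpr hkv
    have hmi : (kv.1, kv.2) ∈ (PySem.Dict.mk LP).items := by simpa using hmem
    exact PySem.Dict.get?_of_mem_items _ hmi hP

-- ===== VERDICT (by name: the statement is the Claim_ definition above) =====
theorem compare_folder_structures_py_spec : Claim_equal_compare_folder_structures_py := by
  intro old_folder new_folder current_local current_cloud _hDom _hPre
  unfold Spec_compare_folder_structures_py
  have hinjO : ∀ a b, PySem.Str.startswith a (old_folder ++ "/") = true →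
      PySem.Str.startswith b (old_folder ++ "/") = true →
      PySem.Str.slice a (some (PySem.Str.len old_folder + 1)) none
        = PySem.Str.slice b (some (PySem.Str.len old_folder + 1)) none → a = b := by
    intro a b ha hb hs
    exact pvStripInj (old_folder ++ "/") a b ha hb (by rw [pvLen_prefix]; exact hs)
  have hinjN : ∀ a b, PySem.Str.startswith a (new_folder ++ "/") = true →
      PySem.Str.startswith b (new_folder ++ "/") = true →
      PySem.Str.slice a (some (PySem.Str.len new_folder + 1)) none
        = PySem.Str.slice b (some (PySem.Str.len new_folder + 1)) none → a = b := by
    intro a b ha hb hs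
    exact pvStripInj (new_folder ++ "/") a b ha hb (by rw [pvLen_prefix]; exact hs)
  simp only [compare_folder_structures_py, compare_folder_structures_py_alt, pvLen_prefix]
  have hfoldO : current_cloud.foldl (fun d fd =>
        if PySem.Str.startswith fd.1 (old_folder ++ "/") then
          d.insert (PySem.Str.slice fd.1 (some (PySem.Str.len old_folder + 1)) none) fd.2
        else d) PySem.Dict.empty
      = pvT (fun s => PySem.Str.startswith s (old_folder ++ "/"))
          (fun s => PySem.Str.slice s (some (PySem.Str.len old_folder + 1)) none)
          (PySem.Dict.ofList current_cloud) :=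
    pvT_foldl _ _ hinjO current_cloud PySem.Dict.empty
  have hfoldN : current_local.foldl (fun d fms =>
        if PySem.Str.startswith fms.1 (new_folder ++ "/") then
          d.insert (PySem.Str.slice fms.1 (some (PySem.Str.len new_folder + 1)) none) fms.2
        else d) PySem.Dict.empty
      = pvT (fun s => PySem.Str.startswith s (new_folder ++ "/"))
          (fun s => PySem.Str.slice s (some (PySem.Str.len new_folder + 1)) none)
          (PySem.Dict.ofList current_local) :=
    pvT_foldl _ _ hinjN current_local PySem.Dict.empty
  rw [hfoldO, hfoldN]
  set FO := ((PySem.Dict.ofList current_cloud).items.filter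
      (fun p => PySem.Str.startswith p.1 (old_folder ++ "/"))).map
      (fun p => (PySem.Str.slice p.1 (some (PySem.Str.len old_folder + 1)) none, p.2)) with hFO
  set FN := ((PySem.Dict.ofList current_local).items.filter
      (fun p => PySem.Str.startswith p.1 (new_folder ++ "/"))).map
      (fun p => (PySem.Str.slice p.1 (some (PySem.Str.len new_folder + 1)) none, p.2)) with hFN
  set LP := FO.map (fun p => (p.1, PySem.Dict.getD (PySem.Dict.mk p.2) "size" 0)) with hLP
  set LQ := FN.map (fun p => (p.1, p.2.2)) with hLQ
  have hP : (LP.map Prod.fst).Nodup := by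
    rw [hLP, List.map_map]
    have : (Prod.fst ∘ fun p : String × List (String × Int) =>
        (p.1, PySem.Dict.getD (PySem.Dict.mk p.2) "size" 0)) = Prod.fst := rfl
    rw [this, hFO]
    exact pvKeysNodup _ _ hinjO current_cloud
  have hQ : (LQ.map Prod.fst).Nodup := by
    rw [hLQ, List.map_map]
    have : (Prod.fst ∘ fun p : String × Int × Int => (p.1, p.2.2)) = Prod.fst := rfl
    rw [this, hFN]
    exact pvKeysNodup _ _ hinjN current_local
  have hAll : (pvT (fun s => PySem.Str.startswith s (new_folder ++ "/"))
        (fun s => PySem.Str.slice s (some (PySem.Str.len new_folder + 1)) none)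
        (PySem.Dict.ofList current_local)).items.all
      (fun p => (pvMapVal (fun d => PySem.Dict.getD (PySem.Dict.mk d) "size" 0)
        (pvT (fun s => PySem.Str.startswith s (old_folder ++ "/"))
          (fun s => PySem.Str.slice s (some (PySem.Str.len old_folder + 1)) none)
          (PySem.Dict.ofList current_cloud))).get? p.1 == some p.2.2)
      = LQ.all (fun kv => (PySem.Dict.mk LP).get? kv.1 == some kv.2) := by
    rw [hLQ, List.all_map]
    rfl
  have hsort := pvSortEq LP LQ hP hQ
  -- B side: its two lists are exactly LP and LQ
  have hBold : ((PySem.Dict.ofList current_cloud).items.filter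
      (fun fd => PySem.Str.startswith fd.1 (old_folder ++ "/"))).map
      (fun fd => (PySem.Str.slice fd.1 (some (PySem.Str.len old_folder + 1)) none,
        PySem.Dict.getD (PySem.Dict.mk fd.2) "size" 0)) = LP := by
    rw [hLP, hFO, List.map_map]; rfl
  have hBnew : ((PySem.Dict.ofList current_local).items.filter
      (fun fm => PySem.Str.startswith fm.1 (new_folder ++ "/"))).map
      (fun fm => (PySem.Str.slice fm.1 (some (PySem.Str.len new_folder + 1)) none, fm.2.2)) = LQ := by
    rw [hLQ, hFN, List.map_map]; rfl
  rw [hBold, hBnew, ← hsort]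
  rw [pvCheckA_eq_all, hAll]
  show (if FO.length ≠ FN.length then false else LQ.all _) = _
  have hlen : LP.length = FO.length := by rw [hLP, List.length_map]
  have hlen' : LQ.length = FN.length := by rw [hLQ, List.length_map]
  by_cases h : FO.length = FN.length
  · rw [if_neg (by simpa using h)]
    have hb : (LP.length == LQ.length) = true := by simp [hlen, hlen', h]
    rw [hb, Bool.true_and]
  · rw [if_pos (by simpa using h)]
    have hb : (LP.length == LQ.length) = false := by simp [hlen, hlen', h]
    rw [hb, Bool.false_and]
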